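-- pv_equiv track=rewrite | github.com/Joefear/dgce-engine | aether/dgce/game_adapter_stage2_dispatch.py | _safe_preview_id
-- ===== SOURCE A (Python) =====
-- def _safe_preview_id(preview_id: str) -> str:
--     normalized = "".join(ch.lower() if ch.isalnum() else "-" for ch in str(preview_id).strip())
--     while "--" in normalized:
--         normalized = normalized.replace("--", "-")
--     normalized = normalized.strip("-")
--     if not normalized:
--         raise ValueError("preview_id must not be empty")
--     return normalized
-- ===== SOURCE B (Python) =====
-- def _safe_preview_id(preview_id: str) -> str:
--     mapped = "".join(ch.lower() if ch.isalnum() else " " for ch in str(preview_id))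
--     tokens = mapped.split()
--     if not tokens:
--         raise ValueError("preview_id must not be empty")
--     return "-".join(tokens)
-- ===== Notes on version B (the rewrite author's own statement) =====
-- stated objective: idiomatic
-- what changed: Replaces the repeated whole-string double-dash-collapsing replace loop plus end-strip with a single map to alnum-or-space followed by str.split() and a dash join, which collapses and trims separators in one pass.
import Mathlib
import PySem

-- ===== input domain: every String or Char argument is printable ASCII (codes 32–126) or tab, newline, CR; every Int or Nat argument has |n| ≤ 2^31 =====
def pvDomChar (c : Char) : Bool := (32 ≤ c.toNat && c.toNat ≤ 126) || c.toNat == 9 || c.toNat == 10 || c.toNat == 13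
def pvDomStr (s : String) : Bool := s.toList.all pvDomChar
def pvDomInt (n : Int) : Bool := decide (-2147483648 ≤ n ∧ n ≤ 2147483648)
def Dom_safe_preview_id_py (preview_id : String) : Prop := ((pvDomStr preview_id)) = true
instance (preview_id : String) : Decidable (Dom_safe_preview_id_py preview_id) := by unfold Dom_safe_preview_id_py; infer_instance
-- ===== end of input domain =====

-- B replaces A's repeated dash-collapsing replace loop plus end-strip by one map to
-- alnum-or-space, str.split() and a dash join (same return value; no claim beyond the theorems below).

-- ===== PORT A =====
-- per-character normalization of A: lowercase an alnum char, a dash otherwise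
def pvGA (c : Char) : Char := if PySem.Chars.isalnum c then PySem.Chars.lowerChar c else '-'

-- A's while loop: as long as a double dash occurs, replace it by a single dash.
-- Fuelled by the string length (each replace that fires shortens the string, so
-- `cs.length` steps always reach the fixpoint).
def pvWhileA : Nat → List Char → List Char
  | 0, cs => cs
  | fuel+1, cs =>
    if PySem.Chars.isIn ['-', '-'] cs then pvWhileA fuel (PySem.Chars.replace cs ['-', '-'] ['-'])
    else cs

def safe_preview_id_py (preview_id : String) : String :=
  let stripped := PySem.Chars.strip preview_id.toList
  let normalized := stripped.map pvGA          -- "".join(1-char pieces) = map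
  let collapsed := pvWhileA normalized.length normalized
  String.ofList (PySem.Chars.stripChars collapsed ['-'])
  -- the ValueError raised when the result is empty is excluded by Pre_safe_preview_id_py

-- ===== PORT B =====
-- per-character normalization of B: lowercase an alnum char, a space otherwise
def pvGB (c : Char) : Char := if PySem.Chars.isalnum c then PySem.Chars.lowerChar c else ' '

def safe_preview_id_py_alt (preview_id : String) : String :=
  let mapped := preview_id.toList.map pvGB
  let tokens := PySem.Chars.split₀ mapped
  String.ofList (PySem.Chars.join ['-'] tokens)
  -- the ValueError raised when tokens is empty is excluded by Pre_safe_preview_id_py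

-- ===== PRECONDITION & SPEC =====
-- Pre_ excludes exactly the inputs with no alphanumeric character, on which Python A
-- (and Python B) raises ValueError.
def Pre_safe_preview_id_py (preview_id : String) : Prop :=
  preview_id.toList.any PySem.Chars.isalnum = true
instance (preview_id : String) : Decidable (Pre_safe_preview_id_py preview_id) := by
  unfold Pre_safe_preview_id_py; infer_instance

def pvWitness_safe_preview_id_py : String := "My Demo--7 "

def Spec_safe_preview_id_py (preview_id : String) (out : String) : Prop := out = safe_preview_id_py_alt preview_id
instance (preview_id : String) (out : String) : Decidable (Spec_safe_preview_id_py preview_id out) := by unfold Spec_safe_preview_id_py; infer_instance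

-- ===== CLAIM (what is proved, stated in full; the proofs are below) =====
def Claim_equal_safe_preview_id_py : Prop := ∀ (preview_id : String), Dom_safe_preview_id_py preview_id → Pre_safe_preview_id_py preview_id → Spec_safe_preview_id_py preview_id (safe_preview_id_py preview_id)

-- ===== LEMMAS AND PROOFS =====

-- `pvRep cs`: one left-to-right non-overlapping replace pass (double dash -> dash)
def pvRep : List Char → List Char
  | [] => []
  | c :: t =>
    if ['-', '-'].isPrefixOf (c :: t) then '-' :: pvRep t.tail
    else c :: pvRep t
termination_by l => l.length
decreasing_by all_goals (simp [List.length_tail]; try omega)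

-- collapse every run of consecutive dashes to a single dash
def pvSquash : List Char → List Char
  | [] => []
  | [c] => [c]
  | c :: d :: t => if c = '-' ∧ d = '-' then pvSquash (d :: t) else c :: pvSquash (d :: t)

-- tokens of the ORIGINAL string: maximal alnum runs, lowercased, with a pending
-- (reversed) current word `cur` — mirrors split₀.go's state
def pvT (cur : List Char) : List Char → List (List Char)
  | [] => if cur = [] then [] else [cur.reverse]
  | c :: t =>
    if PySem.Chars.isalnum c then pvT (PySem.Chars.lowerChar c :: cur) t
    else (if cur = [] then [] else [cur.reverse]) ++ pvT [] t

mutual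
-- canonical final answer: tokens joined by single dashes (J = at a word boundary,
-- K = just after an alnum char)
def pvJ : List Char → List Char
  | [] => []
  | c :: t => if PySem.Chars.isalnum c then PySem.Chars.lowerChar c :: pvK t else pvJ t
def pvK : List Char → List Char
  | [] => []
  | c :: t =>
    if PySem.Chars.isalnum c then PySem.Chars.lowerChar c :: pvK t
    else if t.any PySem.Chars.isalnum then '-' :: pvJ t else []
end

mutual
-- like pvJ/pvK but keeping one trailing dash when the input ends in a separator
def pvD : List Char → List Char
  | [] => []
  | c :: t => if PySem.Chars.isalnum c then PySem.Chars.lowerChar c :: pvE t else pvD t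
def pvE : List Char → List Char
  | [] => []
  | c :: t => if PySem.Chars.isalnum c then PySem.Chars.lowerChar c :: pvE t else '-' :: pvD t
end

-- leading dash of the squashed A-string
def pvLd : List Char → List Char
  | [] => []
  | c :: _ => if PySem.Chars.isalnum c then [] else ['-']

-- ---- character-level facts ----
lemma pv_lower_range (c : Char) (h : PySem.Chars.isalnum c = true) :
    (48 ≤ (PySem.Chars.lowerChar c).toNat ∧ (PySem.Chars.lowerChar c).toNat ≤ 57) ∨
    (97 ≤ (PySem.Chars.lowerChar c).toNat ∧ (PySem.Chars.lowerChar c).toNat ≤ 122) := by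
  simp [PySem.Chars.isalnum, PySem.Chars.isalpha, PySem.Chars.isdigit, PySem.Chars.isupper,
    PySem.Chars.islower, Char.le_def, UInt32.le_iff_toNat_le] at h
  by_cases hu : PySem.Chars.isupper c = true
  · have h65 : 65 ≤ c.toNat ∧ c.toNat ≤ 90 := by
      simpa [PySem.Chars.isupper, Char.le_def, UInt32.le_iff_toNat_le] using hu
    have hofs : (Char.ofNat (c.toNat + 32)).toNat = c.toNat + 32 := by
      have hv : (c.toNat + 32).isValidChar := Or.inl (by omega)
      rw [Char.ofNat, dif_pos hv]; rfl
    simp [PySem.Chars.lowerChar, hu, hofs]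
    omega
  · have hnu : ¬ (65 ≤ c.toNat ∧ c.toNat ≤ 90) := by
      simpa [PySem.Chars.isupper, Char.le_def, UInt32.le_iff_toNat_le] using hu
    simp [PySem.Chars.lowerChar, hu]
    have : c.toNat = c.val.toNat := rfl
    omega

lemma pv_lower_notspace (c : Char) (h : PySem.Chars.isalnum c = true) :
    PySem.Chars.isspace (PySem.Chars.lowerChar c) = false := by
  have := pv_lower_range c h
  simp [PySem.Chars.isspace]
  omega

lemma pv_lower_ne_dash (c : Char) (h : PySem.Chars.isalnum c = true) :
    PySem.Chars.lowerChar c ≠ '-' := by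
  have := pv_lower_range c h
  intro he
  rw [he] at this
  simp at this

lemma pv_space_not_alnum (c : Char) (h : PySem.Chars.isspace c = true) :
    PySem.Chars.isalnum c = false := by
  simp [PySem.Chars.isspace] at h
  simp [PySem.Chars.isalnum, PySem.Chars.isalpha, PySem.Chars.isdigit, PySem.Chars.isupper,
    PySem.Chars.islower, Char.le_def, UInt32.le_iff_toNat_le]
  omega

-- ---- replace = pvRep ----
lemma pv_prefix_iff (c : Char) (t : List Char) :
    ['-','-'].isPrefixOf (c :: t) = true ↔ c = '-' ∧ ∃ r, t = '-' :: r := by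
  cases t with
  | nil => simp [List.isPrefixOf]
  | cons d r =>
    rw [List.isPrefixOf_iff_prefix, List.cons_prefix_cons, List.cons_prefix_cons]
    constructor
    · rintro ⟨h1, h2, _⟩; exact ⟨h1.symm, r, by rw [← h2]⟩
    · rintro ⟨h1, r', hr⟩
      have hd : d = '-' := by injection hr
      exact ⟨h1.symm, hd.symm, List.nil_prefix⟩

lemma pv_squash_dd (r : List Char) : pvSquash ('-' :: '-' :: r) = pvSquash ('-' :: r) := by
  rw [pvSquash, if_pos ⟨rfl, rfl⟩]

lemma pv_replace_go_eq : ∀ (fuel : Nat) (l acc : List Char), l.length ≤ fuel →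
    PySem.Chars.replace.go ['-','-'] ['-'] fuel l acc = acc.reverse ++ pvRep l := by
  intro fuel
  induction fuel with
  | zero =>
    intro l acc h
    have : l = [] := by cases l <;> simp_all
    subst this
    rw [PySem.Chars.replace.go]
    simp [pvRep]
  | succ n ih =>
    intro l acc h
    cases l with
    | nil => rw [PySem.Chars.replace.go] <;> simp [pvRep]
    | cons c t =>
      rw [PySem.Chars.replace.go]
      by_cases hp : ['-','-'].isPrefixOf (c :: t) = true
      · rw [if_pos hp]
        obtain ⟨hc, r, hr⟩ := (pv_prefix_iff c t).mp hp
        subst hc; subst hr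
        simp only [List.length_cons] at h
        rw [ih _ _ (by simp; omega)]
        rw [pvRep, if_pos hp]
        simp
      · rw [if_neg hp]
        simp only [List.length_cons] at h
        rw [ih _ _ (by omega)]
        rw [pvRep, if_neg hp]
        simp

lemma pv_replace_eq_rep (s : List Char) :
    PySem.Chars.replace s ['-','-'] ['-'] = pvRep s := by
  rw [PySem.Chars.replace]
  simp
  exact pv_replace_go_eq s.length s [] le_rfl

-- ---- squash lemmas ----
lemma pv_squash_cons_nondash (c : Char) (hc : c ≠ '-') (v : List Char) :
    pvSquash (c :: v) = c :: pvSquash v := by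
  cases v with
  | nil => rfl
  | cons d r => rw [pvSquash, if_neg (by tauto)]

lemma pv_squash_of_not_infix : ∀ u : List Char, ¬ ['-','-'] <:+: u → pvSquash u = u := by
  intro u
  induction u with
  | nil => intro _; rfl
  | cons c t ih =>
    intro h
    have ht : ¬ ['-','-'] <:+: t := fun hi => h (List.infix_cons hi)
    by_cases hc : c = '-'
    · subst hc
      cases t with
      | nil => rfl
      | cons d r =>
        have hd : d ≠ '-' := by
          rintro rfl
          exact h ⟨[], r, by simp⟩
        rw [pvSquash, if_neg (by tauto), ih ht]
    · rw [pv_squash_cons_nondash c hc, ih ht]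

lemma pv_rep_length_le : ∀ u : List Char, (pvRep u).length ≤ u.length := by
  intro u
  induction u using pvRep.induct with
  | case1 => simp [pvRep]
  | case2 c t hp ih =>
    rw [pvRep, if_pos hp]
    simp only [List.length_cons]
    have : t.tail.length ≤ t.length := by cases t <;> simp
    omega
  | case3 c t hp ih =>
    rw [pvRep, if_neg hp]
    simp
    omega

lemma pv_rep_length_lt : ∀ u : List Char, ['-','-'] <:+: u → (pvRep u).length < u.length := by
  intro u
  induction u using pvRep.induct with
  | case1 => intro h; simp at h
  | case2 c t hp ih =>
    intro _
    obtain ⟨hc, r, hr⟩ := (pv_prefix_iff c t).mp hp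
    subst hr
    rw [pvRep, if_pos hp]
    simp only [List.tail_cons, List.length_cons]
    have := pv_rep_length_le r
    omega
  | case3 c t hp ih =>
    intro h
    rw [pvRep, if_neg hp]
    simp only [List.length_cons]
    have hti : ['-','-'] <:+: t := by
      rcases (List.infix_cons_iff).mp h with h1 | h2
      · exact absurd ((List.isPrefixOf_iff_prefix).mpr h1) hp
      · exact h2
    exact Nat.add_lt_add_right (ih hti) 1

lemma pv_squash_cons_rep : ∀ (u : List Char) (c : Char),
    pvSquash (c :: pvRep u) = pvSquash (c :: u) := by
  intro u
  induction u using pvRep.induct with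
  | case1 => intro c; simp [pvRep]
  | case2 c1 t hp ih =>
    intro c
    obtain ⟨hc1, r, hr⟩ := (pv_prefix_iff c1 t).mp hp
    subst hc1; subst hr
    rw [pvRep, if_pos hp]
    simp only [List.tail_cons] at ih ⊢
    by_cases hc : c = '-'
    · subst hc
      rw [pv_squash_dd, pv_squash_dd, pv_squash_dd, ih '-']
    · rw [pv_squash_cons_nondash c hc, pv_squash_cons_nondash c hc, pv_squash_dd, ih '-']
  | case3 c1 t hp ih =>
    intro c
    rw [pvRep, if_neg hp]
    by_cases hpair : c = '-' ∧ c1 = '-'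
    · obtain ⟨rfl, rfl⟩ := hpair
      rw [pvSquash, if_pos ⟨rfl, rfl⟩, pvSquash, if_pos ⟨rfl, rfl⟩]
      exact ih '-'
    · rw [pvSquash, if_neg hpair, pvSquash, if_neg hpair]
      rw [ih c1]

lemma pv_squash_rep : ∀ u : List Char, pvSquash (pvRep u) = pvSquash u := by
  intro u
  cases u with
  | nil => simp [pvRep]
  | cons c t =>
    by_cases hp : ['-','-'].isPrefixOf (c :: t) = true
    · obtain ⟨rfl, r, rfl⟩ := (pv_prefix_iff c t).mp hp
      rw [pvRep, if_pos hp]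
      simp only [List.tail_cons]
      rw [pv_squash_dd, pv_squash_cons_rep]
    · rw [pvRep, if_neg hp, pv_squash_cons_rep]

lemma pv_while_eq_squash : ∀ (fuel : Nat) (u : List Char), u.length ≤ fuel →
    pvWhileA fuel u = pvSquash u := by
  intro fuel
  induction fuel with
  | zero =>
    intro u h
    have : u = [] := by cases u <;> simp_all
    subst this; rfl
  | succ n ih =>
    intro u h
    rw [pvWhileA]
    by_cases hin : PySem.Chars.isIn ['-','-'] u = true
    · rw [if_pos hin, pv_replace_eq_rep]
      have hinf : ['-','-'] <:+: u := (PySem.Chars.isIn_iff_infix _ _).mp hin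
      have hlt := pv_rep_length_lt u hinf
      rw [ih _ (by omega), pv_squash_rep]
    · rw [if_neg hin]
      exact (pv_squash_of_not_infix u (by
        intro hinf
        exact hin ((PySem.Chars.isIn_iff_infix _ _).mpr hinf))).symm

-- ---- squashed A-string = pvLd ++ pvD ----
lemma pv_E_eq_ld_D (t : List Char) : pvE t = pvLd t ++ pvD t := by
  cases t with
  | nil => rfl
  | cons c t =>
    by_cases h : PySem.Chars.isalnum c = true
    · simp [pvE, pvD, pvLd, h]
    · simp [pvE, pvD, pvLd, h]

lemma pv_ga_dash_iff (c : Char) : pvGA c = '-' ↔ PySem.Chars.isalnum c = false := by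
  unfold pvGA
  by_cases h : PySem.Chars.isalnum c = true
  · simp [h, pv_lower_ne_dash c h]
  · simp [h]

lemma pv_squash_map : ∀ t : List Char, pvSquash (t.map pvGA) = pvLd t ++ pvD t := by
  intro t
  induction t with
  | nil => simp [pvSquash, pvLd, pvD]
  | cons c t ih =>
    by_cases h : PySem.Chars.isalnum c = true
    · have hga : pvGA c = PySem.Chars.lowerChar c := by simp [pvGA, h]
      simp only [List.map_cons, hga]
      rw [pv_squash_cons_nondash _ (pv_lower_ne_dash c h), ih]
      simp [pvLd, pvD, h, pv_E_eq_ld_D]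
    · have hga : pvGA c = '-' := (pv_ga_dash_iff c).mpr (by simp at h; exact h)
      simp only [List.map_cons, hga]
      cases t with
      | nil => simp [pvSquash, pvLd, pvD, h]
      | cons c2 t2 =>
        by_cases h2 : PySem.Chars.isalnum c2 = true
        · have hga2 : pvGA c2 = PySem.Chars.lowerChar c2 := by simp [pvGA, h2]
          simp only [List.map_cons]
          rw [pvSquash, if_neg (by rw [hga2]; rintro ⟨-, hd⟩; exact pv_lower_ne_dash c2 h2 hd)]
          rw [show (pvGA c2 :: t2.map pvGA) = (c2 :: t2).map pvGA from by simp, ih]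
          simp [pvLd, pvD, h, h2]
        · have hga2 : pvGA c2 = '-' := (pv_ga_dash_iff c2).mpr (by simp at h2; exact h2)
          simp only [List.map_cons, hga2]
          rw [pv_squash_dd]
          rw [show ('-' :: t2.map pvGA) = (c2 :: t2).map pvGA from by simp [hga2], ih]
          simp [pvLd, pvD, h, h2]

-- ---- pvD vs pvJ ----
lemma pv_noalnum_JD : ∀ t : List Char, t.any PySem.Chars.isalnum = false →
    pvJ t = [] ∧ pvD t = [] := by
  intro t
  induction t with
  | nil => intro _; exact ⟨rfl, rfl⟩
  | cons c t ih =>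
    intro h
    simp only [List.any_cons, Bool.or_eq_false_iff] at h
    obtain ⟨hc, ht⟩ := h
    simp [pvJ, pvD, hc, ih ht]

lemma pv_J_ne_nil : ∀ t : List Char, t.any PySem.Chars.isalnum = true → pvJ t ≠ [] := by
  intro t
  induction t with
  | nil => intro h; simp at h
  | cons c t ih =>
    intro h
    by_cases hc : PySem.Chars.isalnum c = true
    · simp [pvJ, hc]
    · simp only [List.any_cons, Bool.or_eq_true_iff] at h
      rcases h with h | h
      · exact absurd h hc
      · simp [pvJ, hc]
        exact ih h

lemma pv_D_decomp : ∀ t : List Char,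
    (pvD t = pvJ t ∨ pvD t = pvJ t ++ ['-']) ∧ (pvE t = pvK t ∨ pvE t = pvK t ++ ['-']) := by
  intro t
  induction t with
  | nil => exact ⟨Or.inl rfl, Or.inl rfl⟩
  | cons c t ih =>
    obtain ⟨ihD, ihE⟩ := ih
    by_cases hc : PySem.Chars.isalnum c = true
    · constructor
      · rcases ihE with h | h
        · exact Or.inl (by simp [pvD, pvJ, hc, h])
        · exact Or.inr (by simp [pvD, pvJ, hc, h])
      · rcases ihE with h | h
        · exact Or.inl (by simp [pvE, pvK, hc, h])
        · exact Or.inr (by simp [pvE, pvK, hc, h])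
    · constructor
      · rcases ihD with h | h
        · exact Or.inl (by simp [pvD, pvJ, hc, h])
        · exact Or.inr (by simp [pvD, pvJ, hc, h])
      · cases hany : t.any PySem.Chars.isalnum with
        | true =>
          rcases ihD with h | h
          · exact Or.inl (by simp [pvE, pvK, hc, hany, h])
          · exact Or.inr (by simp [pvE, pvK, hc, hany, h])
        | false =>
          have hD := (pv_noalnum_JD t hany).2
          exact Or.inr (by simp [pvE, pvK, hc, hany, hD])

lemma pv_D_head : ∀ t : List Char, pvD t = [] ∨ ∃ c r, pvD t = c :: r ∧ c ≠ '-' := by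
  intro t
  induction t with
  | nil => exact Or.inl rfl
  | cons c t ih =>
    by_cases hc : PySem.Chars.isalnum c = true
    · exact Or.inr ⟨PySem.Chars.lowerChar c, pvE t, by simp [pvD, hc], pv_lower_ne_dash c hc⟩
    · simpa [pvD, hc] using ih

lemma pv_JK_last : ∀ t : List Char,
    (∀ c, (pvJ t).getLast? = some c → c ≠ '-') ∧ (∀ c, (pvK t).getLast? = some c → c ≠ '-') := by
  intro t
  induction t with
  | nil => constructor <;> (intro c h; simp [pvJ, pvK] at h)
  | cons c t ih =>
    obtain ⟨ihJ, ihK⟩ := ih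
    have hcons : ∀ x, x ≠ '-' → ∀ c', (x :: pvK t).getLast? = some c' → c' ≠ '-' := by
      intro x hx c' h
      cases hK : pvK t with
      | nil => rw [hK] at h; simp at h; exact h ▸ hx
      | cons y ys =>
        rw [hK, List.getLast?_cons_cons] at h
        exact ihK c' (by rw [hK]; exact h)
    by_cases hc : PySem.Chars.isalnum c = true
    · constructor
      · intro c' h
        rw [show pvJ (c :: t) = PySem.Chars.lowerChar c :: pvK t from by simp [pvJ, hc]] at h
        exact hcons _ (pv_lower_ne_dash c hc) c' h
      · intro c' h
        rw [show pvK (c :: t) = PySem.Chars.lowerChar c :: pvK t from by simp [pvK, hc]] at h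
        exact hcons _ (pv_lower_ne_dash c hc) c' h
    · constructor
      · intro c' h
        rw [show pvJ (c :: t) = pvJ t from by simp [pvJ, hc]] at h
        exact ihJ c' h
      · intro c' h
        cases hany : t.any PySem.Chars.isalnum with
        | false => rw [show pvK (c :: t) = [] from by simp [pvK, hc, hany]] at h; simp at h
        | true =>
          rw [show pvK (c :: t) = '-' :: pvJ t from by simp [pvK, hc, hany]] at h
          cases hJ : pvJ t with
          | nil => exact absurd hJ (pv_J_ne_nil t hany)
          | cons y ys =>
            rw [hJ, List.getLast?_cons_cons] at h
            exact ihJ c' (by rw [hJ]; exact h)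

-- ---- stripChars of the decomposition ----
lemma pv_strip_ldD (t : List Char) :
    PySem.Chars.stripChars (pvLd t ++ pvD t) ['-'] = pvJ t := by
  show (List.dropWhile (fun c => List.contains ['-'] c)
      (List.dropWhile (fun c => List.contains ['-'] c) (pvLd t ++ pvD t)).reverse).reverse = pvJ t
  have hp : ∀ c : Char, (['-'].contains c) = (c = '-' : Bool) := by
    intro c; simp
  have hdropD : List.dropWhile (fun c => ['-'].contains c) (pvD t) = pvD t := by
    rcases pv_D_head t with h | ⟨c, r, h, hc⟩
    · rw [h]; rfl
    · rw [h, List.dropWhile_cons, if_neg (by simp [hc])]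
  have h1 : List.dropWhile (fun c => ['-'].contains c) (pvLd t ++ pvD t) = pvD t := by
    have hld : pvLd t = [] ∨ pvLd t = ['-'] := by
      cases t with
      | nil => exact Or.inl rfl
      | cons c t => by_cases h : PySem.Chars.isalnum c = true <;> simp [pvLd, h]
    rcases hld with h | h
    · rw [h, List.nil_append, hdropD]
    · rw [h]
      simp only [List.cons_append, List.dropWhile_cons]
      rw [if_pos (by simp), List.nil_append, hdropD]
  rw [h1]
  have hJrev : List.dropWhile (fun c => ['-'].contains c) (pvJ t).reverse = (pvJ t).reverse := by
    cases hJ : (pvJ t).reverse with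
    | nil => rfl
    | cons a as =>
      have ha : (pvJ t).getLast? = some a := by
        rw [List.getLast?_eq_head?_reverse, hJ]; rfl
      rw [List.dropWhile_cons, if_neg (by simp [(pv_JK_last t).1 a ha])]
  rcases (pv_D_decomp t).1 with h | h
  · rw [h, hJrev, List.reverse_reverse]
  · rw [h]
    simp only [List.reverse_append, List.reverse_cons, List.reverse_nil, List.nil_append,
      List.singleton_append, List.dropWhile_cons]
    rw [if_pos (by simp), hJrev, List.reverse_reverse]

-- ---- strip invariance of pvJ ----
lemma pv_J_append_trash : ∀ (xs ys : List Char), (∀ w ∈ ys, PySem.Chars.isalnum w = false) →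
    pvJ (xs ++ ys) = pvJ xs ∧ pvK (xs ++ ys) = pvK xs := by
  intro xs ys hys
  have hany : ys.any PySem.Chars.isalnum = false := by
    simp only [List.any_eq_false]
    intro w hw; simp [hys w hw]
  induction xs with
  | nil =>
    constructor
    · simpa using (pv_noalnum_JD ys hany).1
    · simp only [List.nil_append]
      cases ys with
      | nil => rfl
      | cons c ys' =>
        have hc := hys c (by simp)
        have hany' : ys'.any PySem.Chars.isalnum = false := by
          simp only [List.any_cons, Bool.or_eq_false_iff] at hany
          exact hany.2
        simp [pvK, hc, hany']
  | cons c xs ih =>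
    obtain ⟨ihJ, ihK⟩ := ih
    by_cases hc : PySem.Chars.isalnum c = true
    · constructor
      · simp [pvJ, hc, ihK]
      · simp [pvK, hc, ihK]
    · constructor
      · simp [pvJ, hc, ihJ]
      · have hanyapp : (xs ++ ys).any PySem.Chars.isalnum = xs.any PySem.Chars.isalnum := by
          rw [List.any_append, hany, Bool.or_false]
        simp only [List.cons_append]
        cases hx : xs.any PySem.Chars.isalnum with
        | true => simp [pvK, hc, hanyapp, hx, ihJ]
        | false => simp [pvK, hc, hanyapp, hx]

lemma pv_J_strip (l : List Char) : pvJ (PySem.Chars.strip l) = pvJ l := by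
  have hl : ∀ m : List Char, pvJ (List.dropWhile PySem.Chars.isspace m) = pvJ m := by
    intro m
    induction m with
    | nil => rfl
    | cons c m ih =>
      by_cases hc : PySem.Chars.isspace c = true
      · rw [List.dropWhile_cons, if_pos (by simp [hc]), ih,
          show pvJ (c :: m) = pvJ m from by simp [pvJ, pv_space_not_alnum c hc]]
      · rw [List.dropWhile_cons, if_neg (by simpa using hc)]
  have hr : ∀ m : List Char, pvJ (PySem.Chars.rstrip m) = pvJ m := by
    intro m
    have hdecomp : m = PySem.Chars.rstrip m ++ (List.takeWhile PySem.Chars.isspace m.reverse).reverse := by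
      unfold PySem.Chars.rstrip
      conv_lhs => rw [← List.reverse_reverse m, ← List.takeWhile_append_dropWhile
        (p := PySem.Chars.isspace) (l := m.reverse)]
      rw [List.reverse_append]
    conv_rhs => rw [hdecomp]
    exact ((pv_J_append_trash (PySem.Chars.rstrip m)
      ((List.takeWhile PySem.Chars.isspace m.reverse).reverse) (by
        intro w hw
        rw [List.mem_reverse] at hw
        exact pv_space_not_alnum w (List.mem_takeWhile_imp hw))).1).symm
  unfold PySem.Chars.strip PySem.Chars.lstrip
  rw [hr, hl]

-- ---- B side: split₀ and join ----
lemma pv_split_go_spec : ∀ (t cur : List Char) (acc : List (List Char)),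
    PySem.Chars.split₀.go (t.map pvGB) cur acc = acc.reverse ++ pvT cur t := by
  intro t
  induction t with
  | nil =>
    intro cur acc
    rw [List.map_nil, PySem.Chars.split₀.go]
    cases cur with
    | nil => simp [pvT]
    | cons x xs => simp [pvT]
  | cons c t ih =>
    intro cur acc
    rw [List.map_cons, PySem.Chars.split₀.go]
    by_cases hc : PySem.Chars.isalnum c = true
    · have hgb : pvGB c = PySem.Chars.lowerChar c := by simp [pvGB, hc]
      rw [hgb, if_neg (by simp [pv_lower_notspace c hc])]
      rw [ih]
      simp [pvT, hc]
    · have hgb : pvGB c = ' ' := by simp [pvGB, hc]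
      rw [hgb, if_pos (by decide)]
      cases cur with
      | nil =>
        rw [if_pos (by simp), ih]
        simp [pvT, hc]
      | cons x xs =>
        rw [if_neg (by simp), ih]
        simp [pvT, hc]

lemma pv_T_nil_of_noalnum : ∀ t : List Char, t.any PySem.Chars.isalnum = false →
    pvT [] t = [] := by
  intro t
  induction t with
  | nil => intro _; rfl
  | cons c t ih =>
    intro h
    simp only [List.any_cons, Bool.or_eq_false_iff] at h
    simp [pvT, h.1, ih h.2]

lemma pv_T_pending_ne_nil : ∀ (t cur : List Char), cur ≠ [] → pvT cur t ≠ [] := by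
  intro t
  induction t with
  | nil => intro cur hc; simp [pvT, hc]
  | cons c t ih =>
    intro cur hc
    by_cases h : PySem.Chars.isalnum c = true
    · simp only [pvT, h, if_pos]
      exact ih _ (by simp)
    · simp [pvT, h, hc]

lemma pv_T_ne_nil : ∀ (t cur : List Char), t.any PySem.Chars.isalnum = true → pvT cur t ≠ [] := by
  intro t
  induction t with
  | nil => intro cur h; simp at h
  | cons c t ih =>
    intro cur h
    by_cases hc : PySem.Chars.isalnum c = true
    · simp only [pvT, hc, if_pos]
      exact pv_T_pending_ne_nil t _ (by simp)
    · simp only [List.any_cons, Bool.or_eq_true_iff] at h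
      rcases h with h | h
      · exact absurd h hc
      · simp [pvT, hc]
        intro _
        exact ih [] h

lemma pv_join_T : ∀ t : List Char,
    PySem.Chars.join ['-'] (pvT [] t) = pvJ t ∧
    (∀ cur : List Char, cur ≠ [] → PySem.Chars.join ['-'] (pvT cur t) = cur.reverse ++ pvK t) := by
  intro t
  induction t with
  | nil =>
    constructor
    · rfl
    · intro cur hc
      simp [pvT, hc, pvK, PySem.Chars.join_singleton]
  | cons c t ih =>
    obtain ⟨ih1, ih2⟩ := ih
    by_cases hc : PySem.Chars.isalnum c = true
    · constructor
      · rw [show pvT [] (c :: t) = pvT [PySem.Chars.lowerChar c] t from by simp [pvT, hc]]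
        rw [ih2 _ (by simp)]
        simp [pvJ, hc]
      · intro cur hcur
        rw [show pvT cur (c :: t) = pvT (PySem.Chars.lowerChar c :: cur) t from by simp [pvT, hc]]
        rw [ih2 _ (by simp)]
        simp [pvK, hc]
    · constructor
      · rw [show pvT [] (c :: t) = pvT [] t from by simp [pvT, hc]]
        rw [ih1]
        simp [pvJ, hc]
      · intro cur hcur
        rw [show pvT cur (c :: t) = cur.reverse :: pvT [] t from by simp [pvT, hc, hcur]]
        cases hT : pvT [] t with
        | nil =>
          have hany : t.any PySem.Chars.isalnum = false := by
            cases hany : t.any PySem.Chars.isalnum with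
            | true => exact absurd hT (pv_T_ne_nil t [] hany)
            | false => rfl
          rw [PySem.Chars.join_singleton]
          simp [pvK, hc, hany]
        | cons x xs =>
          rw [PySem.Chars.join_cons_cons]
          have hany : t.any PySem.Chars.isalnum = true := by
            cases hany : t.any PySem.Chars.isalnum with
            | true => rfl
            | false => rw [pv_T_nil_of_noalnum t hany] at hT; simp at hT
          rw [← hT, ih1]
          simp [pvK, hc, hany]

-- ===== VERDICT (by name: the statement is the Claim_ definition above) =====
theorem safe_preview_id_py_spec : Claim_equal_safe_preview_id_py := by
  intro s _ _
  unfold Spec_safe_preview_id_py safe_preview_id_py safe_preview_id_py_alt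
  simp only []
  apply congrArg String.ofList
  rw [pv_while_eq_squash _ _ le_rfl, pv_squash_map, pv_strip_ldD, pv_J_strip]
  rw [show PySem.Chars.split₀ (s.toList.map pvGB) = pvT [] s.toList from by
    rw [PySem.Chars.split₀, pv_split_go_spec s.toList [] []]; rfl]
  exact ((pv_join_T s.toList).1).symm
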